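-- pv_equiv track=rewrite | github.com/thoranna/learning_to_taste | scripts/prediction.py | get_multi_labels
-- ===== SOURCE A (Python) =====
-- def get_multi_labels(dictionaries, ids):
--     multi_labels = []
--     for id in ids:
--         labels = []
--         for dictionary in dictionaries.values():
--             labels.append(dictionary[int(id)])
--         multi_labels.append(labels)
--     return multi_labels
-- ===== SOURCE B (Python) =====
-- def get_multi_labels(dictionaries, ids):
--     columns = [[d[int(id)] for id in ids] for d in dictionaries.values()]
--     if not columns:
--         return [[] for _ in ids]
--     return [list(row) for row in zip(*columns)]
-- ===== Notes on version B (the rewrite author's own statement) =====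
-- stated objective: alternative
-- what changed: B swaps the loop nesting: it builds one column per dictionary (iterating dictionaries outermost) and then transposes with zip(*columns), instead of A's row-by-row inner scan over dictionaries for each id.
import Mathlib
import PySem

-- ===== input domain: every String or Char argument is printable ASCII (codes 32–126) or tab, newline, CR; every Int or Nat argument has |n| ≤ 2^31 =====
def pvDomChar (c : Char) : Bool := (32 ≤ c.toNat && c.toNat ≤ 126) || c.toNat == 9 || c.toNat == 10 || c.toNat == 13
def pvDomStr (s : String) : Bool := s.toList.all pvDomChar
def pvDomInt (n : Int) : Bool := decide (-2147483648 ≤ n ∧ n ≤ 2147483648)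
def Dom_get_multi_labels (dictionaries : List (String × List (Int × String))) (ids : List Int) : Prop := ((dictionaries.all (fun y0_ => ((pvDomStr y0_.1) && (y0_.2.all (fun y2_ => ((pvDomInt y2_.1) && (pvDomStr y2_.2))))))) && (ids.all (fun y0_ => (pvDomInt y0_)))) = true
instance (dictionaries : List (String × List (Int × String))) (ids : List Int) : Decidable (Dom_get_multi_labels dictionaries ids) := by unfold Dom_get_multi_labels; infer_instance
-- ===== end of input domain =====

-- B swaps the loop nesting: one column per dictionary, then a zip-style transpose; same cost, different decomposition.

-- ===== PORT A =====
-- dictionary[int(id)]: id is an int so int(id) = id; Pre_ guarantees the key is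
-- present, so the "" default of getD is never returned on admitted inputs.
def get_multi_labels (dictionaries : List (String × List (Int × String))) (ids : List Int) : List (List String) :=
  -- multi_labels = []; for id in ids: labels = []; for dictionary in values: labels.append(...)
  ids.foldl (fun multi_labels id =>
    multi_labels ++ [dictionaries.foldl (fun labels dictionary =>
      labels ++ [(PySem.Dict.mk dictionary.2).getD id ""]) []]) []

-- ===== PORT B =====
-- heads/tails step of Python's zip(*columns): none once any column is exhausted.
def pvHeadsTails : List (List String) → Option (List String × List (List String))
  | [] => some ([], [])
  | [] :: _ => none
  | (h :: t) :: rest => (pvHeadsTails rest).map (fun p => (h :: p.1, t :: p.2))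

-- [list(row) for row in zip(*cols)] for a NONEMPTY cols (B only calls it then)
def pvTransp : List (List String) → List (List String)
  | [] => []
  | [] :: _ => []
  | (h :: t) :: rest =>
    match pvHeadsTails rest with
    | none => []
    | some (hs, ts) => (h :: hs) :: pvTransp (t :: ts)
termination_by cols => (cols.headD []).length
decreasing_by simp

def get_multi_labels_alt (dictionaries : List (String × List (Int × String))) (ids : List Int) : List (List String) :=
  let columns := dictionaries.map (fun d => ids.map (fun id => (PySem.Dict.mk d.2).getD id ""))
  if columns.isEmpty then ids.map (fun _ => []) else pvTransp columns

-- ===== PRECONDITION & SPEC =====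
-- Pre_ excludes exactly the inputs where A raises KeyError: some id missing from some dictionary.
def Pre_get_multi_labels (dictionaries : List (String × List (Int × String))) (ids : List Int) : Prop :=
  ∀ d ∈ dictionaries, ∀ id ∈ ids, ((PySem.Dict.mk d.2).get? id).isSome
instance (dictionaries : List (String × List (Int × String))) (ids : List Int) : Decidable (Pre_get_multi_labels dictionaries ids) := by unfold Pre_get_multi_labels; infer_instance
def pvWitness_get_multi_labels : (List (String × List (Int × String))) × List Int :=
  ([("a", [(1, "x"), (2, "y")]), ("b", [(1, "u"), (2, "v")])], [2, 1])

def Spec_get_multi_labels (dictionaries : List (String × List (Int × String))) (ids : List Int) (out : List (List String)) : Prop := out = get_multi_labels_alt dictionaries ids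
instance (dictionaries : List (String × List (Int × String))) (ids : List Int) (out : List (List String)) : Decidable (Spec_get_multi_labels dictionaries ids out) := by unfold Spec_get_multi_labels; infer_instance

-- ===== CLAIM (what is proved, stated in full; the proofs are below) =====
def Claim_equal_get_multi_labels : Prop := ∀ (dictionaries : List (String × List (Int × String))) (ids : List Int), Dom_get_multi_labels dictionaries ids → Pre_get_multi_labels dictionaries ids → Spec_get_multi_labels dictionaries ids (get_multi_labels dictionaries ids)

-- ===== LEMMAS AND PROOFS =====

theorem pv_foldl_app_map {α β : Type} (f : α → β) (xs : List α) (acc : List β) :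
    xs.foldl (fun a x => a ++ [f x]) acc = acc ++ xs.map f := by
  induction xs generalizing acc with
  | nil => simp
  | cons x xs ih => simp [List.foldl, ih]

-- A is simply the row-major map of maps
theorem pv_A_eq (ds : List (String × List (Int × String))) (ids : List Int) :
    get_multi_labels ds ids
      = ids.map (fun id => ds.map (fun d => (PySem.Dict.mk d.2).getD id "")) := by
  unfold get_multi_labels
  have : ∀ id : Int,
      ds.foldl (fun labels d => labels ++ [(PySem.Dict.mk d.2).getD id ""]) []
        = ds.map (fun d => (PySem.Dict.mk d.2).getD id "") := by
    intro id; simpa using pv_foldl_app_map (fun d => (PySem.Dict.mk d.2).getD id "") ds []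
  simp only [this]
  simpa using pv_foldl_app_map _ ids []

theorem pv_headsTails_map {α : Type} (g : α → String) (gs : α → List String)
    (ds : List α) :
    pvHeadsTails (ds.map (fun d => g d :: gs d))
      = some (ds.map g, ds.map gs) := by
  induction ds with
  | nil => simp [pvHeadsTails]
  | cons d ds ih => simp [pvHeadsTails, ih]

theorem pvTransp_nil2 (rest : List (List String)) : pvTransp ([] :: rest) = [] := by
  rw [pvTransp]

theorem pvTransp_cons (h : String) (t : List String) (rest : List (List String)) :
    pvTransp ((h :: t) :: rest)
      = match pvHeadsTails rest with
        | none => []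
        | some (hs, ts) => (h :: hs) :: pvTransp (t :: ts) := by
  rw [pvTransp]

-- column-major transpose equals row-major build, for a nonempty dictionary list
theorem pv_transp_eq (g : (String × List (Int × String)) → Int → String)
    (ds : List (String × List (Int × String))) (hds : ds ≠ []) (ids : List Int) :
    pvTransp (ds.map (fun d => ids.map (g d)))
      = ids.map (fun id => ds.map (fun d => g d id)) := by
  induction ids generalizing ds with
  | nil =>
    obtain ⟨d, ds', rfl⟩ := List.exists_cons_of_ne_nil hds
    simp [pvTransp_nil2]
  | cons id ids ih =>
    obtain ⟨d, ds', rfl⟩ := List.exists_cons_of_ne_nil hds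
    simp only [List.map_cons]
    have hht : pvHeadsTails (List.map (fun d => g d id :: List.map (g d) ids) ds')
        = some (List.map (fun d => g d id) ds', List.map (fun d => List.map (g d) ids) ds') :=
      pv_headsTails_map (fun d => g d id) (fun d => ids.map (g d)) ds'
    rw [pvTransp_cons, hht]
    dsimp only
    have : List.map (g d) ids :: List.map (fun d => List.map (g d) ids) ds'
        = (d :: ds').map (fun d => ids.map (g d)) := rfl
    rw [this, ih (d :: ds') (by simp)]
    simp only [List.map_cons]

-- ===== VERDICT (by name: the statement is the Claim_ definition above) =====
theorem get_multi_labels_spec : Claim_equal_get_multi_labels := by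
  intro ds ids _hdom _hpre
  unfold Spec_get_multi_labels get_multi_labels_alt
  rw [pv_A_eq]
  cases ds with
  | nil => simp
  | cons d ds' =>
    have h := pv_transp_eq (fun d id => (PySem.Dict.mk d.2).getD id "") (d :: ds') (by simp) ids
    simp only [List.map_cons, List.isEmpty_cons, if_neg, Bool.false_eq_true, not_false_iff]
    simpa using h.symm
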